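-- pv_equiv track=rewrite | github.com/gbvolkov/bot_platform | agents/theodor_agent/store_artifacts.py | _find_next_unescaped_backtick
-- ===== SOURCE A (Python) =====
-- def _find_next_unescaped_backtick(text: str, start: int) -> int:
--     idx = start
--     size = len(text)
--     while idx < size:
--         if text[idx] == "`" and (idx == 0 or text[idx - 1] != "\\"):
--             return idx
--         idx += 1
--     return size
-- ===== SOURCE B (Python) =====
-- import re
--
-- _UNESCAPED_BACKTICK = re.compile(r'(?<!\\)`')
--
--
-- def _find_next_unescaped_backtick(text: str, start: int) -> int:
--     m = _UNESCAPED_BACKTICK.search(text, start)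
--     return m.start() if m else len(text)
-- ===== Notes on version B (the rewrite author's own statement) =====
-- stated objective: idiomatic
-- what changed: The hand-written index walk with its idx==0 special case is replaced by a single search with a compiled regex (negative lookbehind for a backslash), returning len(text) when no match exists.
-- intended difference: For negative start with -len(text) <= start < 0 whose wrapped-around scan hits an unescaped backtick, A returns a negative index (an artefact of Python's negative indexing); B clamps the search position to 0 and returns the first real unescaped-backtick position, the intended value for a position-returning scanner. — e.g. on _find_next_unescaped_backtick("ab`", -2): A returns -1, B returns 2
import Mathlib
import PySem

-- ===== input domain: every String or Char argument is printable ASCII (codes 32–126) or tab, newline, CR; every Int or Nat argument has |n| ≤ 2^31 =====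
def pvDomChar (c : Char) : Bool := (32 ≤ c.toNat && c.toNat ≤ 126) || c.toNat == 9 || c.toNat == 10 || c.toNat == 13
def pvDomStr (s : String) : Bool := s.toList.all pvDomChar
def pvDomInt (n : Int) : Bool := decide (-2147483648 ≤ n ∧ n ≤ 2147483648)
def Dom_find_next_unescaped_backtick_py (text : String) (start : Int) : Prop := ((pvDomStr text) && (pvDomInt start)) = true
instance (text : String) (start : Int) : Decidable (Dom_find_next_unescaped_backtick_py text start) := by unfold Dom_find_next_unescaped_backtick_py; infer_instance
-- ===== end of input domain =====

-- B replaces A's hand-written index walk (with its idx == 0 special case) by a single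
-- regex search with a negative lookbehind for a backslash; equivalence is proved outside
-- D_ (negative start positions, where A's negative-index wraparound is accidental).

-- ===== PORT A =====
-- the 'while idx < size' loop; fuel = number of remaining iterations ((size - start).toNat
-- at the call, so the loop always terminates exactly as Python's does).  When Python would
-- raise IndexError (pyGet? = none) the port returns 0; Pre_ excludes those inputs.
def pvGoA (s : List Char) (size : Int) : Int → Nat → Int
  | _, 0 => size
  | idx, fuel+1 =>
    if idx < size then
      match PySem.List.pyGet? s idx with
      | none => 0
      | some c =>
        if c = '`' then
          if idx = 0 then idx
          else
            match PySem.List.pyGet? s (idx - 1) with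
            | none => 0
            | some p => if p = '\\' then pvGoA s size (idx + 1) fuel else idx
        else pvGoA s size (idx + 1) fuel
    else size

def find_next_unescaped_backtick_py (text : String) (start : Int) : Int :=
  let s := text.toList
  let size : Int := s.length
  pvGoA s size start (size - start).toNat

-- ===== PORT B =====
-- port of the regex engine's search for r'(?<!\\)`' from position pos: scan the suffix,
-- carrying the previous character (the lookbehind window); exact for this pattern.
def pvReScan : Option Char → List Char → Nat → Option Nat
  | _, [], _ => none
  | prev, c :: rest, pos =>
    if c = '`' ∧ prev ≠ some '\\' then some pos else pvReScan (some c) rest (pos + 1)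

def find_next_unescaped_backtick_py_alt (text : String) (start : Int) : Int :=
  let s := text.toList
  let p : Nat := start.toNat   -- re clamps a negative search position to 0
  match pvReScan ((s.take p).getLast?) (s.drop p) p with
  | some j => (j : Int)
  | none => (s.length : Int)

-- ===== PRECONDITION & SPEC =====
-- Pre_ excludes exactly the inputs where A raises IndexError: start < -len(text), and
-- start = -len(text) with the text starting with a backtick (text[idx-1] out of range).
def Pre_find_next_unescaped_backtick_py (text : String) (start : Int) : Prop :=
  -(text.toList.length : Int) ≤ start ∧
    ¬(0 < text.toList.length ∧ start = -(text.toList.length : Int) ∧ text.toList.getD 0 ' ' = '`')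
instance (text : String) (start : Int) : Decidable (Pre_find_next_unescaped_backtick_py text start) := by unfold Pre_find_next_unescaped_backtick_py; infer_instance

def pvWitness_find_next_unescaped_backtick_py : String × Int := ("a\\`b`", 0)

-- On negative start with -len(text) ≤ start < 0 whose wrapped-around scan hits an
-- unescaped backtick, A returns a negative index (an artefact of Python's negative
-- indexing); B clamps the search position to 0 and returns the first real
-- unescaped-backtick position, the intended value for a position-returning scanner.
def D_find_next_unescaped_backtick_py (text : String) (start : Int) : Prop :=
  start < 0 ∧ ∃ j < text.toList.length, 1 ≤ j ∧ (text.toList.length : Int) + start ≤ (j : Int) ∧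
    text.toList.getD j ' ' = '`' ∧ text.toList.getD (j - 1) ' ' ≠ '\\'
instance (text : String) (start : Int) : Decidable (D_find_next_unescaped_backtick_py text start) := by unfold D_find_next_unescaped_backtick_py; infer_instance

def Spec_find_next_unescaped_backtick_py (text : String) (start : Int) (out : Int) : Prop := ¬ D_find_next_unescaped_backtick_py text start → out = find_next_unescaped_backtick_py_alt text start
instance (text : String) (start : Int) (out : Int) : Decidable (Spec_find_next_unescaped_backtick_py text start out) := by unfold Spec_find_next_unescaped_backtick_py; infer_instance

def pvDiffWitness_find_next_unescaped_backtick_py : String × Int := ("ab`", -2)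
def pvDiffWitnessOut_find_next_unescaped_backtick_py : Int × Int := (-1, 2)

-- ===== CLAIM (what is proved, stated in full; the proofs are below) =====
def Claim_unchanged_find_next_unescaped_backtick_py : Prop := ∀ (text : String) (start : Int), Dom_find_next_unescaped_backtick_py text start → Pre_find_next_unescaped_backtick_py text start → Spec_find_next_unescaped_backtick_py text start (find_next_unescaped_backtick_py text start)
def Claim_changed_find_next_unescaped_backtick_py : Prop := Dom_find_next_unescaped_backtick_py (pvDiffWitness_find_next_unescaped_backtick_py.1) (pvDiffWitness_find_next_unescaped_backtick_py.2) ∧ Pre_find_next_unescaped_backtick_py (pvDiffWitness_find_next_unescaped_backtick_py.1) (pvDiffWitness_find_next_unescaped_backtick_py.2) ∧ D_find_next_unescaped_backtick_py (pvDiffWitness_find_next_unescaped_backtick_py.1) (pvDiffWitness_find_next_unescaped_backtick_py.2) ∧ find_next_unescaped_backtick_py (pvDiffWitness_find_next_unescaped_backtick_py.1) (pvDiffWitness_find_next_unescaped_backtick_py.2) = pvDiffWitnessOut_find_next_unescaped_backtick_py.1 ∧ find_next_unescaped_backtick_py_alt (pvDiffWitness_find_next_unescaped_backtick_py.1) (pvDiffWitness_find_next_unescaped_backtick_py.2)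 = pvDiffWitnessOut_find_next_unescaped_backtick_py.2 ∧ pvDiffWitnessOut_find_next_unescaped_backtick_py.1 ≠ pvDiffWitnessOut_find_next_unescaped_backtick_py.2
def Claim_exact_find_next_unescaped_backtick_py : Prop := ∀ (text : String) (start : Int), Dom_find_next_unescaped_backtick_py text start → Pre_find_next_unescaped_backtick_py text start → D_find_next_unescaped_backtick_py text start → find_next_unescaped_backtick_py text start ≠ find_next_unescaped_backtick_py_alt text start

-- ===== LEMMAS AND PROOFS =====

-- B's result, written as the match over pvReScan starting at Nat position p.
def pvBRes (s : List Char) (p : Nat) : Int :=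
  match pvReScan ((s.take p).getLast?) (s.drop p) p with
  | some j => (j : Int)
  | none => (s.length : Int)

theorem pvAlt_eq (text : String) (start : Int) :
    find_next_unescaped_backtick_py_alt text start = pvBRes text.toList start.toNat := rfl

theorem pvA_eq (text : String) (start : Int) :
    find_next_unescaped_backtick_py text start =
      pvGoA text.toList (text.toList.length : Int) start
        (((text.toList.length : Int) - start).toNat) := rfl

theorem pvBRes_nonneg (s : List Char) (p : Nat) : 0 ≤ pvBRes s p := by
  unfold pvBRes
  cases h : pvReScan ((s.take p).getLast?) (s.drop p) p <;> simp

theorem pvTakeLast (s : List Char) (p : Nat) (hp : 0 < p) (hpn : p ≤ s.length) :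
    (s.take p).getLast? = s[p-1]? := by
  rw [List.getLast?_eq_getElem?]
  simp [List.getElem?_take, Nat.min_eq_left hpn]
  omega

theorem pvL1 (s : List Char) : ∀ (fuel p : Nat), s.length ≤ fuel + p →
    pvGoA s (s.length : Int) (p : Int) fuel = pvBRes s p := by
  intro fuel
  induction fuel with
  | zero =>
    intro p hp
    have hdrop : s.drop p = [] := List.drop_eq_nil_of_le (by omega)
    simp [pvGoA, pvBRes, hdrop, pvReScan]
  | succ f ih =>
    intro p hp
    by_cases hpn : p < s.length
    · have hdrop : s.drop p = s[p] :: s.drop (p + 1) := (List.getElem_cons_drop hpn).symm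
      have hget : PySem.List.pyGet? s (p : Int) = some s[p] := by
        simp [PySem.List.pyGet?_natCast, List.getElem?_eq_getElem hpn]
      have hgetE : s[p]? = some s[p] := List.getElem?_eq_getElem hpn
      by_cases hc : s[p] = '`'
      · by_cases hp0 : p = 0
        · subst hp0
          simp [pvGoA, pvBRes, hdrop, pvReScan, hc, hpn]
        · have hprev : (s.take p).getLast? = some s[p-1] := by
            rw [pvTakeLast s p (by omega) (by omega)]
            simp [List.getElem?_eq_getElem (by omega : p - 1 < s.length)]
          have hget1 : PySem.List.pyGet? s ((p : Int) - 1) = some s[p-1] := by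
            have : ((p : Int) - 1) = ((p - 1 : Nat) : Int) := by omega
            rw [this]
            simp [PySem.List.pyGet?_natCast, List.getElem?_eq_getElem (by omega : p - 1 < s.length)]
          by_cases hb : s[p-1] = '\\'
          · -- both skip
            have hcast : (p : Int) + 1 = ((p + 1 : Nat) : Int) := by push_cast; ring
            have hrec := ih (p + 1) (by omega)
            have hlt : (p:Int) < (s.length:Int) := by exact_mod_cast hpn
            have hne : ¬((p:Int) = 0) := by exact_mod_cast hp0
            simp only [pvGoA, hget, hget1, hc, hb, if_pos hlt, if_neg hne]
            rw [hcast, hrec]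
            unfold pvBRes
            have hprev' : (s.take (p+1)).getLast? = some s[p] := by
              rw [pvTakeLast s (p+1) (by omega) (by omega)]
              simp [List.getElem?_eq_getElem hpn]
            rw [hprev']
            simp [pvReScan, hdrop, hprev, hc, hb]
          · -- both return p
            have hlt : (p:Int) < (s.length:Int) := by exact_mod_cast hpn
            have hne : ¬((p:Int) = 0) := by exact_mod_cast hp0
            simp [pvGoA, hgetE, hget1, hlt, hc, hb, pvBRes, hdrop, pvReScan, hprev]
      · -- not a backtick: both skip
        have hcast : (p : Int) + 1 = ((p + 1 : Nat) : Int) := by push_cast; ring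
        have hrec := ih (p + 1) (by omega)
        have hlt : (p:Int) < (s.length:Int) := by exact_mod_cast hpn
        simp only [pvGoA, hget, if_pos hlt, if_neg hc]
        rw [hcast, hrec]
        unfold pvBRes
        have hprev' : (s.take (p+1)).getLast? = some s[p] := by
          rw [pvTakeLast s (p+1) (by omega) (by omega)]
          simp [List.getElem?_eq_getElem hpn]
        rw [hprev', hdrop]
        simp only [pvReScan]
        rw [if_neg (by simp [hc])]
    · have hdrop : s.drop p = [] := List.drop_eq_nil_of_le (by omega)
      simp [pvGoA, pvBRes, hdrop, pvReScan]
      intro h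
      exfalso; exact hpn (by exact_mod_cast h)

theorem pvL2 (s : List Char) (start : Int)
    (hPre : -(s.length : Int) ≤ start ∧
      ¬(0 < s.length ∧ start = -(s.length : Int) ∧ s.getD 0 ' ' = '`'))
    (noHit : ∀ j, j < s.length → 1 ≤ j → (s.length : Int) + start ≤ (j : Int) →
      ¬(s.getD j ' ' = '`' ∧ s.getD (j - 1) ' ' ≠ '\\')) :
    ∀ (m : Nat) (idx : Int), idx = -((m : Int) + 1) → start ≤ idx →
      pvGoA s (s.length : Int) idx (((s.length : Int) - idx).toNat) =
      pvGoA s (s.length : Int) 0 s.length := by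
  obtain ⟨hpre1, hpre2⟩ := hPre
  intro m
  induction m with
  | zero =>
    intro idx hidx hsi
    subst hidx
    simp only [Nat.cast_zero, zero_add] at hsi ⊢
    -- idx = -1; one step: check s[-1], no hit possible, recurse to 0
    have hn : 0 < s.length := by omega
    have hfuel : (((s.length : Int) - (-1)).toNat) = s.length + 1 := by omega
    rw [hfuel]
    have hget : PySem.List.pyGet? s (-1) = some s[s.length - 1] := by
      rw [PySem.List.pyGet?_neg_one, List.getLast?_eq_getElem?]
      exact List.getElem?_eq_getElem (by omega)
    simp only [pvGoA, hget, if_pos (show (-1 : Int) < (s.length : Int) by omega)]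
    by_cases hc : s[s.length - 1] = '`'
    · rw [if_pos hc, if_neg (by omega : ¬(-1 : Int) = 0)]
      by_cases h1 : s.length = 1
      · -- idx - 1 = -2 out of range → but then j = 0 case: start = -1 = -len, s[0] = '`' excluded by Pre
        exfalso
        apply hpre2
        refine ⟨hn, by omega, ?_⟩
        rw [List.getD_eq_getElem s ' ' hn]
        simp only [show s.length - 1 = 0 from by omega] at hc
        exact hc
      · -- length ≥ 2: j = len-1 ≥ 1 would be a hit unless s[len-2] = '\\'
        have hj1 : 1 ≤ s.length - 1 := by omega
        have hget2 : PySem.List.pyGet? s (-2) = some s[s.length - 2] := by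
          have e : (-2 : Int) = -((2 : Nat) : Int) := by norm_num
          rw [e, PySem.List.pyGet?_neg_natCast s 2 (by omega) (by omega)]
          exact List.getElem?_eq_getElem (by omega)
        have hb : s[s.length - 2] = '\\' := by
          by_contra hb
          exact noHit (s.length - 1) (by omega) hj1 (by omega)
            ⟨by rw [List.getD_eq_getElem s ' ' (by omega)]; exact hc,
             by rw [show s.length - 1 - 1 = s.length - 2 from by omega,
                  List.getD_eq_getElem s ' ' (by omega)]; exact hb⟩
        simp [hget2, hb]
    · rw [if_neg hc]
      norm_num
  | succ k ih =>
    intro idx hidx hsi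
    have hidxdef : idx = -((k : Int) + 1 + 1) := by push_cast at hidx; omega
    have hn : 0 < s.length := by omega
    have hlen : (k : Int) + 2 ≤ (s.length : Int) := by omega
    have hfuel : (((s.length : Int) - idx).toNat) = (s.length + k + 1) + 1 := by omega
    have hidxlt : idx < (s.length : Int) := by omega
    -- the wrapped position j' = len - (k+2)
    have hbnd : s.length - (k + 2) < s.length := by omega
    have hget : PySem.List.pyGet? s idx = some (s[s.length - (k + 2)]'hbnd) := by
      rw [hidxdef, show -((k : Int) + 1 + 1) = -(((k + 2 : Nat)) : Int) from by push_cast; ring]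
      rw [PySem.List.pyGet?_neg_natCast s (k + 2) (by omega) (by omega)]
      exact List.getElem?_eq_getElem hbnd
    have hstep : pvGoA s (s.length : Int) idx (((s.length : Int) - idx).toNat) =
        pvGoA s (s.length : Int) (idx + 1) (((s.length : Int) - (idx + 1)).toNat) := by
      rw [hfuel, show (((s.length : Int) - (idx + 1)).toNat) = s.length + k + 1 from by omega]
      simp only [pvGoA, hget, if_pos hidxlt]
      by_cases hc : s[s.length - (k + 2)] = '`'
      · rw [if_pos hc, if_neg (show ¬idx = 0 from by omega)]
        by_cases h0 : s.length = k + 2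
        · -- wrapped j' = 0: then idx = -len, so idx = start and Pre_ forbids s[0] = '`'
          exfalso
          apply hpre2
          refine ⟨hn, by omega, ?_⟩
          rw [List.getD_eq_getElem s ' ' hn,
            show s[0] = s[s.length - (k+2)] from by congr 1; omega]
          exact hc
        · have hget2 : PySem.List.pyGet? s (idx - 1) = some s[s.length - (k + 3)] := by
            rw [show idx - 1 = -(((k + 3 : Nat)) : Int) from by push_cast; omega,
              PySem.List.pyGet?_neg_natCast s (k + 3) (by omega) (by omega)]
            exact List.getElem?_eq_getElem (by omega)
          have hb : s[s.length - (k + 3)] = '\\' := by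
            by_contra hb
            exact noHit (s.length - (k + 2)) (by omega) (by omega) (by omega)
              ⟨by rw [List.getD_eq_getElem s ' ' (by omega)]; exact hc,
               by rw [show s.length - (k + 2) - 1 = s.length - (k + 3) from by omega,
                    List.getD_eq_getElem s ' ' (by omega)]; exact hb⟩
          simp [hget2, hb]
      · rw [if_neg hc]
    rw [hstep]
    have := ih (idx + 1) (by omega) (by omega)
    exact this

theorem pvL3 (s : List Char) (start : Int) (j : Nat)
    (hpre1 : -(s.length : Int) ≤ start)
    (hpre2 : ¬(0 < s.length ∧ start = -(s.length : Int) ∧ s.getD 0 ' ' = '`'))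
    (hj : j < s.length) (hj1 : 1 ≤ j)
    (hbt : s.getD j ' ' = '`') (hnb : s.getD (j - 1) ' ' ≠ '\\') :
    ∀ (m : Nat) (idx : Int), idx = (j : Int) - (s.length : Int) - (m : Int) → start ≤ idx →
      pvGoA s (s.length : Int) idx (((s.length : Int) - idx).toNat) < 0 := by
  intro m
  induction m with
  | zero =>
    intro idx hidx hsi
    have hidxdef : idx = (j : Int) - (s.length : Int) := by omega
    have hn : 0 < s.length := by omega
    have hidxneg : idx < 0 := by omega
    have hidxlt : idx < (s.length : Int) := by omega
    have hfuel : ∃ f : Nat, (((s.length : Int) - idx).toNat) = f + 1 := ⟨(s.length - 1 - j) + s.length, by omega⟩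
    obtain ⟨f, hf⟩ := hfuel
    have hbnd : j < s.length := hj
    have hget : PySem.List.pyGet? s idx = some (s[j]'hbnd) := by
      rw [hidxdef, show (j : Int) - (s.length : Int) = -(((s.length - j : Nat)) : Int) from by omega]
      rw [PySem.List.pyGet?_neg_natCast s (s.length - j) (by omega) (by omega)]
      rw [show s.length - (s.length - j) = j from by omega]
      exact List.getElem?_eq_getElem hbnd
    have hbnd1 : j - 1 < s.length := by omega
    have hget1 : PySem.List.pyGet? s (idx - 1) = some (s[j - 1]'hbnd1) := by
      rw [hidxdef, show (j : Int) - (s.length : Int) - 1 = -(((s.length - j + 1 : Nat)) : Int) from by omega]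
      rw [PySem.List.pyGet?_neg_natCast s (s.length - j + 1) (by omega) (by omega)]
      rw [show s.length - (s.length - j + 1) = j - 1 from by omega]
      exact List.getElem?_eq_getElem hbnd1
    have hc : s[j]'hbnd = '`' := by rw [← List.getD_eq_getElem s ' ' hbnd]; exact hbt
    have hb : ¬(s[j - 1]'hbnd1 = '\\') := by rw [← List.getD_eq_getElem s ' ' hbnd1]; exact hnb
    rw [hf]
    simp only [pvGoA, hget, hget1, if_pos hidxlt, hc,
      if_neg (show ¬idx = 0 from by omega), if_neg hb]
    exact hidxneg
  | succ k ih =>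
    intro idx hidx hsi
    have hidxdef : idx = (j : Int) - (s.length : Int) - ((k : Int) + 1) := by omega
    have hn : 0 < s.length := by omega
    have hidxneg : idx < 0 := by omega
    have hidxlt : idx < (s.length : Int) := by omega
    have hklen : (k : Int) + 1 + ((s.length : Int) - (j : Int)) ≤ (s.length : Int) := by omega
    -- wrapped position j' = len + idx = j - (k+1)  (as a Nat: j - (k+1))
    have hwrap : ∃ w : Nat, (w : Int) = (s.length : Int) + idx ∧ w < s.length := by
      refine ⟨((s.length : Int) + idx).toNat, by omega, by omega⟩
    obtain ⟨w, hw, hwlt⟩ := hwrap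
    have hget : PySem.List.pyGet? s idx = some (s[w]'hwlt) := by
      rw [show idx = -(((s.length - w : Nat)) : Int) from by omega]
      rw [PySem.List.pyGet?_neg_natCast s (s.length - w) (by omega) (by omega)]
      rw [show s.length - (s.length - w) = w from by omega]
      exact List.getElem?_eq_getElem hwlt
    have hfuel : ∃ f : Nat, (((s.length : Int) - idx).toNat) = f + 1 ∧
        (f : Int) = (s.length : Int) - (idx + 1) := ⟨((s.length : Int) - idx - 1).toNat, by omega, by omega⟩
    obtain ⟨f, hf, hfval⟩ := hfuel
    rw [hf]
    have hrec : pvGoA s (s.length : Int) (idx + 1) f < 0 := by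
      have := ih (idx + 1) (by omega) (by omega)
      rwa [show (((s.length : Int) - (idx + 1)).toNat) = f from by omega] at this
    simp only [pvGoA, hget, if_pos hidxlt]
    by_cases hc : s[w]'hwlt = '`'
    · rw [if_pos hc, if_neg (show ¬idx = 0 from by omega)]
      by_cases hw0 : w = 0
      · -- idx = -len ⇒ idx = start, and Pre_ forbids s[0] = '`'
        exfalso
        apply hpre2
        refine ⟨hn, by omega, ?_⟩
        rw [List.getD_eq_getElem s ' ' hn]
        subst hw0
        exact hc
      · have hbnd1 : w - 1 < s.length := by omega
        have hget1 : PySem.List.pyGet? s (idx - 1) = some (s[w - 1]'hbnd1) := by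
          rw [show idx - 1 = -(((s.length - w + 1 : Nat)) : Int) from by omega]
          rw [PySem.List.pyGet?_neg_natCast s (s.length - w + 1) (by omega) (by omega)]
          rw [show s.length - (s.length - w + 1) = w - 1 from by omega]
          exact List.getElem?_eq_getElem hbnd1
        simp only [hget1]
        by_cases hb : s[w - 1]'hbnd1 = '\\'
        · rw [if_pos hb]; exact hrec
        · rw [if_neg hb]; exact hidxneg
    · rw [if_neg hc]; exact hrec

-- ===== VERDICT (by name: the statement is the Claim_ definition above) =====
theorem find_next_unescaped_backtick_py_spec : Claim_unchanged_find_next_unescaped_backtick_py := by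
  unfold Claim_unchanged_find_next_unescaped_backtick_py
  intro text start _ hPre hnD
  unfold Pre_find_next_unescaped_backtick_py at hPre
  rw [pvA_eq, pvAlt_eq]
  by_cases hs : 0 ≤ start
  · have hcast : start = ((start.toNat : Nat) : Int) := (Int.toNat_of_nonneg hs).symm
    rw [hcast]
    rw [show ((((text.toList.length : Int)) - ((start.toNat : Nat) : Int)).toNat) =
      (((text.toList.length : Int)) - start).toNat from by omega]
    exact pvL1 text.toList _ _ (by omega)
  · replace hs : start < 0 := by omega
    have noHit : ∀ j, j < text.toList.length → 1 ≤ j →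
        (text.toList.length : Int) + start ≤ (j : Int) →
        ¬(text.toList.getD j ' ' = '`' ∧ text.toList.getD (j - 1) ' ' ≠ '\\') := by
      intro j h1 h2 h3 hcontra
      exact hnD ⟨hs, j, h1, h2, h3, hcontra.1, hcontra.2⟩
    have h2 := pvL2 text.toList start hPre noHit (-start - 1).toNat start
      (by omega) (le_refl start)
    rw [h2]
    have h1 := pvL1 text.toList text.toList.length 0 (by omega)
    simp only [Nat.cast_zero] at h1
    rw [h1, show start.toNat = 0 from by omega]

theorem find_next_unescaped_backtick_py_changed : Claim_changed_find_next_unescaped_backtick_py := by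
  unfold Claim_changed_find_next_unescaped_backtick_py; decide

theorem find_next_unescaped_backtick_py_tight : Claim_exact_find_next_unescaped_backtick_py := by
  unfold Claim_exact_find_next_unescaped_backtick_py
  intro text start _ hPre hD
  unfold Pre_find_next_unescaped_backtick_py at hPre
  obtain ⟨hs, j, hjlt, hj1, hjs, hbt, hnb⟩ := hD
  have hA : find_next_unescaped_backtick_py text start < 0 := by
    rw [pvA_eq]
    exact pvL3 text.toList start j hPre.1 hPre.2 hjlt hj1 hbt hnb
      ((j : Int) - (text.toList.length : Int) - start).toNat start (by omega) (le_refl start)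
  have hB : 0 ≤ find_next_unescaped_backtick_py_alt text start := by
    rw [pvAlt_eq]; exact pvBRes_nonneg _ _
  intro heq
  omega
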